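/- GENERATED by tools/from_farm_form.py from farm/worked/reallocarray/Proof.lean (a worked proof of the farm's unit `reallocarray`,
   accepted by the verdict) — do not edit. -/
import ProgX.Base.Spec.Units.reallocarray

open X86 X86.User Asan ProgX.Base

set_option maxRecDepth 4000
set_option maxHeartbeats 4000000

/-- `reallocarray` (c/base/heap.c; 0x103e00 in the base image, 21 instructions) satisfies `ProgX.Base.Spec.reallocarray.spec`, given the contracts of
`heap_product_ok` and `realloc`.
(Carried over from agent GA's proof against its test image, c/heap/heaptest.elf: tools/port_heap_units.py.) -/
theorem ProgX.Base.Spec.Proved.reallocarray_ok : ProgX.Base.Spec.reallocarray.Statement := by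
  intro Lay hLay μ hμ u₀ hcode hproduct h_realloc H rest frames n c u ret he hpre
  have hrealloc := h_realloc H rest frames n c
  v_entry he
  obtain ⟨hp, hcase⟩ := hpre
  have hok := hp.inv.heap
  have hbase := hp.base
  have hlimit := hp.limit
  have hroom := hok.room
  rw [hbase, hlimit] at hroom
  u_walk hcode [hμ.vendor] span [ProgX.Base.L.textLo, ProgX.Base.L.textHi] side (v_side)
  case call_inv =>
    v_inv
  case pre_103e13 =>
    trivial
  case cont =>
    -- after `heap_product_ok(k, s)`
    have hk : s_103e13.reg .rdi = u.reg .rsi := by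
      rw [w_rdi_103e13]
    have hs : s_103e13.reg .rsi = u.reg .rdx := by
      rw [w_rsi_103e13]
    obtain ⟨hmemeq, hyes, hno⟩ := w_post
    rw [hk, hs] at hyes hno
    rw [w_mem_103e13] at hmemeq
    obtain ⟨rv, hrv⟩ : ∃ rv, s_103e13r.reg .rax = rv := ⟨_, rfl⟩
    rw [hrv] at hyes hno
    v_after_call w_rsp_103e13 w_mem_103e13
    clear w_same
    have hpart : (Word.part Width.w32 rv).toNat = rv.toNat % 2 ^ 32 := part32_toNat rv
    u_walk hcode [hμ.vendor] span [ProgX.Base.L.textLo, ProgX.Base.L.textHi] side (v_side)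
    case call_inv =>
      v_inv
    case pre_103e26 =>
      -- the precondition of `realloc(p, k * s)`
      have hun : ShadowUntouched u.mem s_103e26.mem := by v_untouched
      refine ⟨hp.callee hun ?_ ?_ ?_ ?_, ?_⟩
      · rw [hbase, hlimit]
        u_memnorm
        u_eqon
      · rw [w_rsp]
        u_omega
      · rw [w_rsp]
        u_omega
      · rw [w_rsp]
        u_omega
      · rw [w_rdi]
        exact hcase
    case cont =>
      -- `heap_product_ok` said no: NULL; the product fits neither the heap nor any capacity
      have hnot : ¬ ((u.reg .rsi).toNat = 0 ∨ (u.reg .rdx).toNat = 0 ∨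
          ((u.reg .rsi).toNat ≤ 4194272 ∧ (u.reg .rdx).toNat ≤ 4194272)) := by
        intro hy
        have := hyes hy
        omega
      have hbig : 4194272 < (u.reg .rsi).toNat * (u.reg .rdx).toNat :=
        ProgX.Spec.mul_gt_of_factor_gt (by omega) (by omega) (by omega)
      obtain ⟨m, hm⟩ : ∃ m, (u.reg .rsi).toNat * (u.reg .rdx).toNat = m := ⟨_, rfl⟩
      rw [hm] at hbig
      have hlem := le_r16 m
      have hnf : ¬ H.Fits (r16 m) := by
        unfold Heap.Fits
        rw [hbase, hlimit]
        omega
      have hp1 : UInt64.ofNat (s_103e13r.mem.readLE (u.reg .rsp - 8) 8) = u.reg .r12 := by u_resolve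
      have hp2 : UInt64.ofNat (s_103e13r.mem.readLE (u.reg .rsp - 16) 8) = u.reg .rbp := by u_resolve
      have hp3 : UInt64.ofNat (s_103e13r.mem.readLE (u.reg .rsp - 24) 8) = u.reg .rbx := by u_resolve
      have hp0 : UInt64.ofNat (s_103e13r.mem.readLE (u.reg .rsp) 8) = ret := by
        rw [hmemeq]
        u_frame he_retAddr
      clear hno hyes
      u_walk hcode [hμ.vendor] span [ProgX.Base.L.textLo, ProgX.Base.L.textHi] side (v_side)
      refine ReachVia.done ?_
      v_returned
      have hfail : ProgX.Spec.FailPost H rest frames 160 u s_103e2f := by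
        refine ⟨?_, ?_, ?_, ?_⟩
        · first
            | exact w_rax
            | (rw [w_rax]; rfl)
        · refine hp.inv.eqOn (by v_untouched) ?_
          rw [hbase, hlimit]
          u_memnorm
          u_eqon
        · v_untouched
        · u_same
      show (_ → ProgX.Spec.AllocPost H rest frames 160 ((u.reg .rsi).toNat * (u.reg .rdx).toNat)
          (r16 ((u.reg .rsi).toNat * (u.reg .rdx).toNat)) u _) ∧
        (_ → ProgX.Spec.ReallocPost H rest frames 160 _ n c ((u.reg .rsi).toNat * (u.reg .rdx).toNat) u _)
      rw [hm]
      refine ⟨fun _ => ⟨fun hfit => absurd hfit hnf, fun _ => hfail⟩, fun hne => ?_⟩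
      have hlc := hcase.resolve_left hne
      have hi := hok.obj_inside hlc
      have hr := hok.obj_range hlc
      simp only at hi hr
      rw [hlimit] at hi
      rw [hbase] at hr
      refine ⟨fun hc => ?_, fun _ hfit => absurd hfit hnf, fun _ _ => hfail⟩
      exfalso
      omega
    case cont =>
      -- after `realloc(p, k * s)`: `pop rbx ; pop rbp ; pop r12 ; ret`, the result passes through
      have hy : (u.reg .rsi).toNat = 0 ∨ (u.reg .rdx).toNat = 0 ∨
          ((u.reg .rsi).toNat ≤ 4194272 ∧ (u.reg .rdx).toNat ≤ 4194272) := by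
        apply Classical.byContradiction
        intro hn
        have := hno hn
        omega
      have hsmall := ProgX.Spec.mul_small hy
      have hprod : (u.reg .rsi * u.reg .rdx).toNat = (u.reg .rsi).toNat * (u.reg .rdx).toNat := by
        rw [UInt64.toNat_mul]
        exact Nat.mod_eq_of_lt hsmall
      obtain ⟨m, hm⟩ : ∃ m, (u.reg .rsi).toNat * (u.reg .rdx).toNat = m := ⟨_, rfl⟩
      rw [hm] at hprod
      have hn : (s_103e26.reg .rsi).toNat = m := by
        rw [w_rsi_103e26]
        exact hprod
      have hpost : ((u.reg .rdi).toNat = 0 → ProgX.Spec.AllocPost H rest frames 128 m (r16 m) s_103e26 s_103e26r) ∧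
          ((u.reg .rdi).toNat ≠ 0 → ProgX.Spec.ReallocPost H rest frames 128 (u.reg .rdi).toNat n c m s_103e26 s_103e26r) := by
        have this : ((s_103e26.reg .rdi).toNat = 0 →
              ProgX.Spec.AllocPost H rest frames 128 (s_103e26.reg .rsi).toNat (r16 (s_103e26.reg .rsi).toNat) s_103e26 s_103e26r) ∧
            ((s_103e26.reg .rdi).toNat ≠ 0 →
              ProgX.Spec.ReallocPost H rest frames 128 (s_103e26.reg .rdi).toNat n c (s_103e26.reg .rsi).toNat s_103e26 s_103e26r) :=
          w_post
        rw [hn, w_rdi_103e26] at this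
        exact this
      clear w_post hno hyes hmemeq
      obtain ⟨rv2, hrv2⟩ : ∃ rv2, s_103e26r.reg .rax = rv2 := ⟨_, rfl⟩
      have hun : ShadowUntouched u.mem s_103e26.mem := by
        rw [w_mem_103e26]
        v_untouched
      have hstack : Mem.SameExcept [⟨(u.reg .rsp).toNat - 160, (u.reg .rsp).toNat⟩] u.mem s_103e26.mem := by
        rw [w_mem_103e26]
        u_same
      have hle : (s_103e26.reg .rsp).toNat ≤ (u.reg .rsp).toNat := by
        rw [w_rsp_103e26]
        u_omega
      have hF : (u.reg .rsp).toNat - 160 ≤ (s_103e26.reg .rsp).toNat - 128 := by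
        rw [w_rsp_103e26]
        u_omega
      -- where `p` is: NULL, or inside the heap (the footprint of `realloc` has two windows at `p`)
      have hpcase : (u.reg .rdi).toNat = 0 ∨
          (0x800040 ≤ (u.reg .rdi).toNat ∧ (u.reg .rdi).toNat + c + 32 ≤ 0xC00000) := by
        rcases hcase with h0 | hlc
        · exact Or.inl h0
        · have hi := hok.obj_inside hlc
          have hr := hok.obj_range hlc
          simp only at hi hr
          rw [hbase] at hr
          exact Or.inr ⟨by omega, by omega⟩
      v_after_call w_rsp_103e26 w_mem_103e26
      simp only [shadowSpan, Heap.next_def, hbase, hn, w_rdi_103e26] at w_same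
      have hq0 : UInt64.ofNat (s_103e26r.mem.readLE (u.reg .rsp) 8) = ret := by
        u_frame he_retAddr
      have hp1 : UInt64.ofNat (s_103e26.mem.readLE (u.reg .rsp - 8) 8) = u.reg .r12 := by u_resolve
      have hq1 : UInt64.ofNat (s_103e26r.mem.readLE (u.reg .rsp - 8) 8) = u.reg .r12 := by
        rw [w_mem_103e26] at hp1
        u_frame hp1
      have hp2 : UInt64.ofNat (s_103e26.mem.readLE (u.reg .rsp - 16) 8) = u.reg .rbp := by u_resolve
      have hq2 : UInt64.ofNat (s_103e26r.mem.readLE (u.reg .rsp - 16) 8) = u.reg .rbp := by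
        rw [w_mem_103e26] at hp2
        u_frame hp2
      have hp3 : UInt64.ofNat (s_103e26.mem.readLE (u.reg .rsp - 24) 8) = u.reg .rbx := by u_resolve
      have hq3 : UInt64.ofNat (s_103e26r.mem.readLE (u.reg .rsp - 24) 8) = u.reg .rbx := by
        rw [w_mem_103e26] at hp3
        u_frame hp3
      u_walk hcode [hμ.vendor] span [ProgX.Base.L.textLo, ProgX.Base.L.textHi] side (v_side)
      refine ReachVia.done ?_
      v_returned
      · -- the post: `realloc`'s, seen from here (`ProgX.Spec.AllocPost.wrap`, `ProgX.Spec.ReallocPost.wrap`)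
        show (_ → ProgX.Spec.AllocPost H rest frames 160 ((u.reg .rsi).toNat * (u.reg .rdx).toNat)
            (r16 ((u.reg .rsi).toNat * (u.reg .rdx).toNat)) u _) ∧
          (_ → ProgX.Spec.ReallocPost H rest frames 160 _ n c ((u.reg .rsi).toNat * (u.reg .rdx).toNat) u _)
        rw [hm]
        have hrax : s_103e2f.reg .rax = s_103e26r.reg .rax := by
          rw [w_rax, hrv2]
        refine ⟨fun h0 => ?_, fun hne => ?_⟩
        · exact (hpost.1 h0).wrap hp hun hstack hle hF w_mem hrax
        · exact (hpost.2 hne).wrap hp (hcase.resolve_left hne) hun hstack hle hF w_mem hrax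
      · -- the footprint
        simp only [X86.User.Spec.footprint, vspec, shadowSpan, Heap.next_def, hbase, hm]
        u_same
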